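-- pv_equiv track=rewrite | github.com/mevensson/codejam-2018 | qual/Go Gopher/go_gopher.py | find_best_pos
-- ===== SOURCE A (Python) =====
-- def num_empty_at_pos(m, x_pos, y_pos):
--     num_empty = 0
--     for x in range(x_pos - 1, x_pos + 2):
--         for y in range(y_pos - 1, y_pos + 2):
--             if not m[y][x]:
--                 num_empty += 1
--     return num_empty
--
-- def find_best_pos(m, w, h):
--     best_pos = (0, 0)
--     best_num_empty = 0
--     for x in range(1, w - 1):
--         for y in range(1, h - 1):
--             num_empty = num_empty_at_pos(m, x, y)
--             if num_empty > best_num_empty: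
--                 best_pos = (x, y)
--                 best_num_empty = num_empty
--     return best_pos
-- ===== SOURCE B (Python) =====
-- def find_best_pos(m, w, h):
--     if w < 3 or h < 3:
--         return (0, 0)
--     # 2D prefix-sum table of empty cells: P[y][x] = number of empty cells in m[0:y][0:x]
--     P = [[0] * (w + 1)]
--     for y in range(h):
--         prev = P[y]
--         row = [0]
--         for x in range(w):
--             row.append(prev[x + 1] + row[x] - prev[x] + (1 if not m[y][x] else 0))
--         P.append(row)
--     best_pos = (0, 0)
--     best_num_empty = 0
--     for x in range(1, w - 1):
--         for y in range(1, h - 1):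
--             n = P[y + 2][x + 2] - P[y - 1][x + 2] - P[y + 2][x - 1] + P[y - 1][x - 1]
--             if n > best_num_empty:
--                 best_pos = (x, y)
--                 best_num_empty = n
--     return best_pos
-- ===== Notes on version B (the rewrite author's own statement) =====
-- stated objective: alternative
-- what changed: B builds a 2D prefix-sum table of empty cells once and computes each 3x3 window count from four table corners, instead of re-reading the 9 cells for every window position.
import Mathlib
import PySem

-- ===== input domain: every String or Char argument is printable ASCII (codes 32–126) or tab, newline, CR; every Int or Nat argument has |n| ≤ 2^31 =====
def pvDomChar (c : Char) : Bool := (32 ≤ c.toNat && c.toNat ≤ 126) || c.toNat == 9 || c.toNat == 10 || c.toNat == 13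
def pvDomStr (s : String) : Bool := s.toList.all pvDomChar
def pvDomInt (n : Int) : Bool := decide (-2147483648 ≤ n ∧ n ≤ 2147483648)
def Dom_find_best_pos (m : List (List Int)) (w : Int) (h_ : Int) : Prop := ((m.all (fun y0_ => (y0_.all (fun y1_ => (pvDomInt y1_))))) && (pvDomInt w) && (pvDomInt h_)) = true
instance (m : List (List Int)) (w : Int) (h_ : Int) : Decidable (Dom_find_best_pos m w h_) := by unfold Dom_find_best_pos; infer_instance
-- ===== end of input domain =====

-- B replaces A's 9-cell re-scan per 3x3 window with a 2D prefix-sum table queried at four corners; return values proved equal on all inputs where A returns.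


-- ===== PORT A =====
def num_empty_at_pos (m : List (List Int)) (x_pos : Int) (y_pos : Int) : Int :=
  (PySem.List.pyRange (x_pos - 1) (x_pos + 2) 1).foldl (fun num_empty x =>
    (PySem.List.pyRange (y_pos - 1) (y_pos + 2) 1).foldl (fun num_empty y =>
      if PySem.List.pyGetD (PySem.List.pyGetD m y []) x 0 = 0 then num_empty + 1 else num_empty)
      num_empty) 0

def find_best_pos (m : List (List Int)) (w : Int) (h_ : Int) : Int × Int :=
  ((PySem.List.pyRange 1 (w - 1) 1).foldl (fun st x =>
    (PySem.List.pyRange 1 (h_ - 1) 1).foldl (fun st y =>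
      let num_empty := num_empty_at_pos m x y
      if st.2 < num_empty then ((x, y), num_empty) else st) st)
    (((0 : Int), (0 : Int)), (0 : Int))).1

-- ===== PORT B =====
def find_best_pos_alt (m : List (List Int)) (w : Int) (h_ : Int) : Int × Int :=
  if w < 3 ∨ h_ < 3 then (0, 0) else
  -- 2D prefix-sum table of empty cells: P[y][x] = number of empty cells in m[0:y][0:x]
  let P := (PySem.List.pyRange 0 h_ 1).foldl (fun P y =>
      let prev := PySem.List.pyGetD P y []
      let row := (PySem.List.pyRange 0 w 1).foldl (fun row x =>
          row ++ [PySem.List.pyGetD prev (x + 1) 0 + PySem.List.pyGetD row x 0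
                  - PySem.List.pyGetD prev x 0
                  + (if PySem.List.pyGetD (PySem.List.pyGetD m y []) x 0 = 0 then 1 else 0)])
        [0]
      P ++ [row]) [PySem.List.pyRepeat [(0 : Int)] (w + 1)]
  ((PySem.List.pyRange 1 (w - 1) 1).foldl (fun st x =>
    (PySem.List.pyRange 1 (h_ - 1) 1).foldl (fun st y =>
      let n := PySem.List.pyGetD (PySem.List.pyGetD P (y + 2) []) (x + 2) 0
             - PySem.List.pyGetD (PySem.List.pyGetD P (y - 1) []) (x + 2) 0
             - PySem.List.pyGetD (PySem.List.pyGetD P (y + 2) []) (x - 1) 0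
             + PySem.List.pyGetD (PySem.List.pyGetD P (y - 1) []) (x - 1) 0
      if st.2 < n then ((x, y), n) else st) st)
    (((0 : Int), (0 : Int)), (0 : Int))).1

-- ===== PRECONDITION & SPEC =====
-- Pre_: exactly the inputs where the Python A returns (no IndexError): when w,h ≥ 3, A reads
-- m[y][x] for 0 ≤ y < h, 0 ≤ x < w, so the grid must have at least h rows of length ≥ w.
def Pre_find_best_pos (m : List (List Int)) (w : Int) (h_ : Int) : Prop :=
  3 ≤ w → 3 ≤ h_ → (h_ ≤ (m.length : Int) ∧ ∀ row ∈ m.take h_.toNat, w ≤ (row.length : Int))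
instance (m : List (List Int)) (w : Int) (h_ : Int) : Decidable (Pre_find_best_pos m w h_) := by
  unfold Pre_find_best_pos; infer_instance

def pvWitness_find_best_pos : List (List Int) × Int × Int :=
  ([[1, 0, 1], [0, 0, 0], [1, 0, 1]], 3, 3)

def Spec_find_best_pos (m : List (List Int)) (w : Int) (h_ : Int) (out : Int × Int) : Prop := out = find_best_pos_alt m w h_
instance (m : List (List Int)) (w : Int) (h_ : Int) (out : Int × Int) : Decidable (Spec_find_best_pos m w h_ out) := by unfold Spec_find_best_pos; infer_instance

-- ===== CLAIM (what is proved, stated in full; the proofs are below) =====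
def Claim_equal_find_best_pos : Prop := ∀ (m : List (List Int)) (w : Int) (h_ : Int), Dom_find_best_pos m w h_ → Pre_find_best_pos m w h_ → Spec_find_best_pos m w h_ (find_best_pos m w h_)

-- ===== LEMMAS AND PROOFS =====

-- 0/1 indicator of an empty cell (the value both programs test)
def cellE (m : List (List Int)) (y : Int) (x : Int) : Int :=
  if PySem.List.pyGetD (PySem.List.pyGetD m y []) x 0 = 0 then 1 else 0

-- row prefix: number of empty cells among m[y][0:k]
def pref (m : List (List Int)) (y : Int) : Nat → Int
  | 0 => 0
  | k + 1 => pref m y k + cellE m y k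

-- 2D prefix: number of empty cells in m[0:j][0:k]
def S2 (m : List (List Int)) : Nat → Nat → Int
  | 0, _ => 0
  | j + 1, k => S2 m j k + pref m (j : Int) k

-- B's inner row loop, over List.range form
def rowL (m : List (List Int)) (y : Int) (prev : List Int) (n : Nat) : List Int :=
  ((List.range n).map (fun k => (k : Int))).foldl (fun row x =>
    row ++ [PySem.List.pyGetD prev (x + 1) 0 + PySem.List.pyGetD row x 0
            - PySem.List.pyGetD prev x 0
            + (if PySem.List.pyGetD (PySem.List.pyGetD m y []) x 0 = 0 then 1 else 0)]) [0]

-- B's table loop, over List.range form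
def tabL (m : List (List Int)) (w : Int) (hn : Nat) : List (List Int) :=
  ((List.range hn).map (fun k => (k : Int))).foldl
    (fun P y => P ++ [rowL m y (PySem.List.pyGetD P y []) w.toNat])
    [List.replicate (w + 1).toNat 0]

theorem S2_zero_right (m : List (List Int)) (j : Nat) : S2 m j 0 = 0 := by
  induction j with
  | zero => rfl
  | succ j ih => simp [S2, ih, pref]

theorem pyRange0_eq (n : Int) :
    PySem.List.pyRange 0 n 1 = (List.range n.toNat).map (fun k => (k : Int)) := by
  rw [PySem.List.pyRange_one]
  simp only [sub_zero, zero_add]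
  simp only [List.map_id']
  exact List.map_eq_flatMap ..

theorem rowL_succ (m : List (List Int)) (y : Int) (prev : List Int) (n : Nat) :
    rowL m y prev (n + 1) =
      rowL m y prev n ++ [PySem.List.pyGetD prev ((n : Int) + 1) 0
        + PySem.List.pyGetD (rowL m y prev n) (n : Int) 0
        - PySem.List.pyGetD prev (n : Int) 0
        + (if PySem.List.pyGetD (PySem.List.pyGetD m y []) (n : Int) 0 = 0 then 1 else 0)] := by
  simp [rowL, List.range_succ]

theorem rowL_length (m : List (List Int)) (y : Int) (prev : List Int) (n : Nat) :
    (rowL m y prev n).length = n + 1 := by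
  induction n with
  | zero => rfl
  | succ n ih => rw [rowL_succ]; simp [ih]

theorem rowL_getD (m : List (List Int)) (y : Int) (prev : List Int) (n : Nat) :
    ∀ k : Nat, k ≤ n →
      (rowL m y prev n).getD k 0 = prev.getD k 0 - prev.getD 0 0 + pref m y k := by
  induction n with
  | zero =>
    intro k hk
    interval_cases k
    simp [rowL, pref]
  | succ n ih =>
    intro k hk
    rw [rowL_succ]
    rcases Nat.lt_or_ge k (n + 1) with hlt | hge
    · rw [List.getD_append _ _ _ _ (by rw [rowL_length]; omega)]
      exact ih k (by omega)
    · have hk1 : k = n + 1 := by omega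
      subst hk1
      rw [List.getD_append_right _ _ _ _ (by rw [rowL_length])]
      rw [rowL_length]
      simp only [Nat.sub_self, List.getD_cons_zero]
      have hcell : (if PySem.List.pyGetD (PySem.List.pyGetD m y []) (n : Int) 0 = 0 then (1:Int) else 0) = cellE m y n := rfl
      rw [hcell, show ((n : Int) + 1) = ((n + 1 : Nat) : Int) by push_cast; ring]
      simp only [PySem.List.pyGetD_natCast]
      rw [ih n (le_refl n)]
      simp only [pref]
      ring

theorem tabL_succ (m : List (List Int)) (w : Int) (hn : Nat) :
    tabL m w (hn + 1) = tabL m w hn ++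
      [rowL m (hn : Int) (PySem.List.pyGetD (tabL m w hn) (hn : Int) []) w.toNat] := by
  simp [tabL, List.range_succ]

theorem tabL_length (m : List (List Int)) (w : Int) (hn : Nat) :
    (tabL m w hn).length = hn + 1 := by
  induction hn with
  | zero => rfl
  | succ n ih => rw [tabL_succ]; simp [ih]

theorem tabL_getD (m : List (List Int)) (w : Int) (hn : Nat) :
    ∀ j ≤ hn, ∀ k ≤ w.toNat, ((tabL m w hn).getD j []).getD k 0 = S2 m j k := by
  induction hn with
  | zero =>
    intro j hj k hk
    interval_cases j
    simp only [tabL, List.range_zero]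
    simp [S2, List.getD, List.getElem?_replicate]
    split <;> rfl
  | succ n ih =>
    intro j hj k hk
    rw [tabL_succ]
    rcases Nat.lt_or_ge j (n + 1) with hlt | hge
    · rw [List.getD_append _ _ _ _ (by rw [tabL_length]; omega)]
      exact ih j (by omega) k hk
    · have hj1 : j = n + 1 := by omega
      subst hj1
      rw [List.getD_append_right _ _ _ _ (by rw [tabL_length])]
      rw [tabL_length]
      simp only [Nat.sub_self, List.getD_cons_zero]
      rw [PySem.List.pyGetD_natCast]
      rw [rowL_getD _ _ _ _ k hk]
      rw [ih n (le_refl n) k hk, ih n (le_refl n) 0 (Nat.zero_le _)]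
      rw [S2_zero_right]
      simp [S2]

theorem S2_add_three (m : List (List Int)) (b k : Nat) :
    S2 m (b + 3) k = S2 m b k + pref m (b : Int) k + pref m ((b : Int) + 1) k
      + pref m ((b : Int) + 2) k := by
  simp only [S2]
  push_cast
  ring

theorem pref_add_three (m : List (List Int)) (y : Int) (a : Nat) :
    pref m y (a + 3) = pref m y a + cellE m y (a : Int) + cellE m y ((a : Int) + 1)
      + cellE m y ((a : Int) + 2) := by
  simp only [pref]
  push_cast
  ring

theorem range3_eq (a : Int) : PySem.List.pyRange (a - 1) (a + 2) 1 = [a - 1, a, a + 1] := by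
  rw [PySem.List.pyRange_one, show (a + 2 - (a - 1)) = 3 by ring]
  simp only [show ((3:Int)).toNat = 3 from rfl, List.range_succ, List.range_zero,
    List.map_cons, List.map_nil, List.nil_append, List.cons_append]
  norm_num
  ring

theorem if_step (m : List (List Int)) (y x acc : Int) :
    (if PySem.List.pyGetD (PySem.List.pyGetD m y []) x 0 = 0 then acc + 1 else acc)
      = acc + cellE m y x := by
  unfold cellE; split <;> ring

theorem num_empty_expand (m : List (List Int)) (x y : Int) :
    num_empty_at_pos m x y =
      cellE m (y - 1) (x - 1) + cellE m y (x - 1) + cellE m (y + 1) (x - 1)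
      + cellE m (y - 1) x + cellE m y x + cellE m (y + 1) x
      + cellE m (y - 1) (x + 1) + cellE m y (x + 1) + cellE m (y + 1) (x + 1) := by
  unfold num_empty_at_pos
  rw [range3_eq x, range3_eq y]
  simp only [List.foldl_cons, List.foldl_nil, if_step]
  ring

theorem window_eq (m : List (List Int)) (w h_ : Int) (hw : 3 ≤ w) (hh : 3 ≤ h_)
    (x y : Int) (hx1 : 1 ≤ x) (hx2 : x < w - 1) (hy1 : 1 ≤ y) (hy2 : y < h_ - 1) :
    PySem.List.pyGetD (PySem.List.pyGetD (tabL m w h_.toNat) (y + 2) []) (x + 2) 0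
      - PySem.List.pyGetD (PySem.List.pyGetD (tabL m w h_.toNat) (y - 1) []) (x + 2) 0
      - PySem.List.pyGetD (PySem.List.pyGetD (tabL m w h_.toNat) (y + 2) []) (x - 1) 0
      + PySem.List.pyGetD (PySem.List.pyGetD (tabL m w h_.toNat) (y - 1) []) (x - 1) 0
    = num_empty_at_pos m x y := by
  obtain ⟨a, ha⟩ : ∃ a : Nat, x = (a : Int) + 1 := ⟨(x - 1).toNat, by omega⟩
  obtain ⟨b, hb⟩ : ∃ b : Nat, y = (b : Int) + 1 := ⟨(y - 1).toNat, by omega⟩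
  subst ha hb
  have e1 : ((b : Int) + 1 + 2) = ((b + 3 : Nat) : Int) := by push_cast; ring
  have e2 : ((b : Int) + 1 - 1) = ((b : Nat) : Int) := by ring
  have e3 : ((a : Int) + 1 + 2) = ((a + 3 : Nat) : Int) := by push_cast; ring
  have e4 : ((a : Int) + 1 - 1) = ((a : Nat) : Int) := by ring
  rw [e1, e2, e3, e4]
  rw [PySem.List.pyGetD_natCast, PySem.List.pyGetD_natCast, PySem.List.pyGetD_natCast,
      PySem.List.pyGetD_natCast, PySem.List.pyGetD_natCast, PySem.List.pyGetD_natCast]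
  rw [tabL_getD m w h_.toNat (b + 3) (by omega) (a + 3) (by omega),
      tabL_getD m w h_.toNat (b + 3) (by omega) a (by omega),
      tabL_getD m w h_.toNat b (by omega) (a + 3) (by omega),
      tabL_getD m w h_.toNat b (by omega) a (by omega)]
  rw [num_empty_expand]
  rw [S2_add_three, S2_add_three, pref_add_three, pref_add_three, pref_add_three]
  rw [e2, e4, show ((b:Int) + 1 + 1) = (b:Int) + 2 by ring,
      show ((a:Int) + 1 + 1) = (a:Int) + 2 by ring]
  ring

theorem foldl_id {α β : Type} (l : List α) (s : β) : l.foldl (fun s _ => s) s = s := by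
  induction l generalizing s with
  | nil => rfl
  | cons a l ih => simp [List.foldl_cons, ih]

theorem ports_agree (m : List (List Int)) (w h_ : Int) :
    find_best_pos m w h_ = find_best_pos_alt m w h_ := by
  by_cases hcond : w < 3 ∨ h_ < 3
  · rw [find_best_pos_alt, if_pos hcond]
    unfold find_best_pos
    rcases hcond with hw | hh
    · rw [show PySem.List.pyRange 1 (w - 1) 1 = [] from PySem.List.pyRange_one_eq_nil (by omega)]
      rfl
    · simp only [show PySem.List.pyRange 1 (h_ - 1) 1 = [] from
        PySem.List.pyRange_one_eq_nil (by omega), List.foldl_nil]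
      rw [foldl_id]
  · rw [not_or] at hcond
    obtain ⟨hw', hh'⟩ := hcond
    have hw : 3 ≤ w := by omega
    have hh : 3 ≤ h_ := by omega
    have hP : (PySem.List.pyRange 0 h_ 1).foldl (fun P y =>
        P ++ [(PySem.List.pyRange 0 w 1).foldl (fun row x =>
            row ++ [PySem.List.pyGetD (PySem.List.pyGetD P y []) (x + 1) 0
                    + PySem.List.pyGetD row x 0
                    - PySem.List.pyGetD (PySem.List.pyGetD P y []) x 0
                    + (if PySem.List.pyGetD (PySem.List.pyGetD m y []) x 0 = 0 then 1 else 0)])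
          [0]]) [PySem.List.pyRepeat [(0 : Int)] (w + 1)] = tabL m w h_.toNat := by
      simp only [pyRange0_eq, PySem.List.pyRepeat_singleton, tabL, rowL]
    simp only [find_best_pos_alt, if_neg (show ¬(w < 3 ∨ h_ < 3) by omega)]
    rw [hP]
    unfold find_best_pos
    congr 1
    apply PySem.List.foldl_congr_mem
    intro st x hxm
    apply PySem.List.foldl_congr_mem
    intro st' y hym
    obtain ⟨hx1, hx2⟩ := PySem.List.mem_pyRange_one.mp hxm
    obtain ⟨hy1, hy2⟩ := PySem.List.mem_pyRange_one.mp hym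
    dsimp only
    rw [window_eq m w h_ hw hh x y hx1 hx2 hy1 hy2]

-- ===== VERDICT (by name: the statement is the Claim_ definition above) =====
theorem find_best_pos_spec : Claim_equal_find_best_pos := by
  intro m w h_ _ _
  unfold Spec_find_best_pos
  exact ports_agree m w h_
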